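-- pv_equiv track=rewrite | github.com/ParasharaRamesh/EPIJudge | epi_judge_python/convert_base.py | convert_num_from_some_other_base_to_base_10
-- ===== SOURCE A (Python) =====
-- def convert_list_to_num(num):
--     result = 0
--     for i,ch in enumerate(reversed(num)):
--         result += int(ch) * (10 ** i)
--     return result
--
-- def convert_num_from_some_other_base_to_base_10(num, b1):
--     charMapToValue = {chr(ord("A") + i - 10): i for i in range(10, 36)}
--     for i in range(10):
--         charMapToValue[str(i)] = i
--
--     # convert to base 10 from b1
--     base10num = 0
--     if b1 == 10:
--         # if already in base 10 use it as is
--         base10num = convert_list_to_num(num)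
--     else:
--         for i, ch in enumerate(reversed(num)):
--             base10num += charMapToValue[ch] * (b1 ** i)
--     return base10num
-- ===== SOURCE B (Python) =====
-- def convert_num_from_some_other_base_to_base_10(num, b1):
--     # Horner's method: one left-to-right pass, no powers.
--     # int(ch, 36) decodes '0'-'9' and letters exactly like A's char map on A's domain.
--     result = 0
--     for ch in num:
--         result = result * b1 + int(ch, 36)
--     return result
-- ===== Notes on version B (the rewrite author's own statement) =====
-- stated objective: simpler
-- what changed: Replaces the reversed-enumerate sum with explicit powers b1**i (and the hand-built char map / separate base-10 helper) by a single left-to-right Horner accumulation result = result*b1 + int(ch, 36).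
import Mathlib
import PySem

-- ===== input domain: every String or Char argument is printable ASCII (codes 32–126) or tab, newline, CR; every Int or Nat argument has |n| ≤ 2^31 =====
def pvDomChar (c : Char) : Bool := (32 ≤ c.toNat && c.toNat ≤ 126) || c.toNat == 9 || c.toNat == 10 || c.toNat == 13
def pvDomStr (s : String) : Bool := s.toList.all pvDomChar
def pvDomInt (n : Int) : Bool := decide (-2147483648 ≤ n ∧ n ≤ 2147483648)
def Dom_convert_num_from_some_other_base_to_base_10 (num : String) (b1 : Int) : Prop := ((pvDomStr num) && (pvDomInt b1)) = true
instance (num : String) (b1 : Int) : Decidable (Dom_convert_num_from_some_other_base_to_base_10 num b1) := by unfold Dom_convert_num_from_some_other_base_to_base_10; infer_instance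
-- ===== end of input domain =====

-- B replaces A's reversed-enumerate sum with explicit powers (plus a hand-built char map and a
-- separate base-10 helper) by a single left-to-right Horner pass: simpler, no powers computed.


-- ===== PORT A =====
-- {chr(ord("A")+i-10): i for i in range(10,36)} then charMapToValue[str(i)] = i for i in range(10).
-- Python keys are 1-character strings; ported as Char (num is iterated character by character).
def pvCharMapToValue : PySem.Dict Char Int :=
  (PySem.List.pyRange 0 10 1).foldl
    (fun d i => d.insert (Char.ofNat (48 + i.toNat)) i)
    ((PySem.List.pyRange 10 36 1).foldl
      (fun d i => d.insert (Char.ofNat (65 + i - 10).toNat) i) PySem.Dict.empty)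

-- int(ch): exact via PySem.Int.ofStr? on the 1-char string; the none case (ValueError) is outside Pre_.
def convert_list_to_num (num : String) : Int :=
  (PySem.List.enumerate num.toList.reverse 0).foldl
    (fun result p => result + (PySem.Int.ofStr? (String.ofList [p.2])).getD 0 * 10 ^ p.1.toNat) 0

-- charMapToValue[ch]: KeyError (missing key) is outside Pre_, ported as getD 0.
def convert_num_from_some_other_base_to_base_10 (num : String) (b1 : Int) : Int :=
  if b1 = 10 then
    convert_list_to_num num
  else
    (PySem.List.enumerate num.toList.reverse 0).foldl
      (fun base10num p => base10num + pvCharMapToValue.getD p.2 0 * b1 ^ p.1.toNat) 0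

-- ===== PORT B =====
-- int(ch, 36); the ValueError case (char not alphanumeric) is outside Pre_.
def pvDigit36 (c : Char) : Int :=
  if '0' ≤ c ∧ c ≤ '9' then (c.toNat : Int) - 48
  else if 'A' ≤ c ∧ c ≤ 'Z' then (c.toNat : Int) - 55
  else if 'a' ≤ c ∧ c ≤ 'z' then (c.toNat : Int) - 87
  else 0

def convert_num_from_some_other_base_to_base_10_alt (num : String) (b1 : Int) : Int :=
  num.toList.foldl (fun result ch => result * b1 + pvDigit36 ch) 0

-- ===== PRECONDITION & SPEC =====
-- Exactly where A returns: with b1 == 10 every char must be a digit (int(ch) raises otherwise);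
-- otherwise every char must be a digit or an uppercase letter (the char-map keys), else KeyError.
def pvValidChar (b1 : Int) (c : Char) : Bool :=
  if b1 = 10 then ('0' ≤ c && c ≤ '9')
  else (('0' ≤ c && c ≤ '9') || ('A' ≤ c && c ≤ 'Z'))
def Pre_convert_num_from_some_other_base_to_base_10 (num : String) (b1 : Int) : Prop :=
  num.toList.all (pvValidChar b1) = true
instance (num : String) (b1 : Int) : Decidable (Pre_convert_num_from_some_other_base_to_base_10 num b1) := by unfold Pre_convert_num_from_some_other_base_to_base_10; infer_instance

def pvWitness_convert_num_from_some_other_base_to_base_10 : String × Int := ("1A", 16)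

def Spec_convert_num_from_some_other_base_to_base_10 (num : String) (b1 : Int) (out : Int) : Prop := out = convert_num_from_some_other_base_to_base_10_alt num b1
instance (num : String) (b1 : Int) (out : Int) : Decidable (Spec_convert_num_from_some_other_base_to_base_10 num b1 out) := by unfold Spec_convert_num_from_some_other_base_to_base_10; infer_instance

-- ===== CLAIM (what is proved, stated in full; the proofs are below) =====
def Claim_equal_convert_num_from_some_other_base_to_base_10 : Prop := ∀ (num : String) (b1 : Int), Dom_convert_num_from_some_other_base_to_base_10 num b1 → Pre_convert_num_from_some_other_base_to_base_10 num b1 → Spec_convert_num_from_some_other_base_to_base_10 num b1 (convert_num_from_some_other_base_to_base_10 num b1)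

-- ===== LEMMAS AND PROOFS =====

-- Horner's rule: the left-to-right accumulation equals A's reversed-enumerate positional sum.
theorem pv_horner (f : Char → Int) (b : Int) :
    ∀ (l : List Char) (r : Int),
      l.foldl (fun acc c => acc * b + f c) r
        = r * b ^ l.length
          + (PySem.List.enumerate l.reverse 0).foldl (fun acc p => acc + f p.2 * b ^ p.1.toNat) 0 := by
  intro l
  induction l with
  | nil => intro r; simp
  | cons x t ih =>
    intro r
    have hrev : (x :: t).reverse = t.reverse ++ [x] := by simp
    rw [List.foldl_cons, ih, hrev, PySem.List.enumerate_append]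
    rw [List.foldl_append,
        PySem.List.foldl_add (g := fun p : Int × Char => f p.2 * b ^ p.1.toNat)]
    simp
    ring

-- the two decoders agree on valid characters (finite checks over the ASCII range)
set_option maxRecDepth 8192 in
theorem pv_aux_map : ∀ n : Nat, n < 128 → ((48 ≤ n ∧ n ≤ 57) ∨ (65 ≤ n ∧ n ≤ 90)) →
    pvCharMapToValue.getD (Char.ofNat n) 0 = pvDigit36 (Char.ofNat n) := by decide

set_option maxRecDepth 8192 in
theorem pv_aux_int : ∀ n : Nat, n < 128 → (48 ≤ n ∧ n ≤ 57) →
    (PySem.Int.ofStr? (String.ofList [Char.ofNat n])).getD 0 = pvDigit36 (Char.ofNat n) := by decide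

theorem pv_map_eq_digit36 (c : Char)
    (h : ('0' ≤ c ∧ c ≤ '9') ∨ ('A' ≤ c ∧ c ≤ 'Z')) :
    pvCharMapToValue.getD c 0 = pvDigit36 c := by
  have hn : (48 ≤ c.toNat ∧ c.toNat ≤ 57) ∨ (65 ≤ c.toNat ∧ c.toNat ≤ 90) := by
    simp only [Char.le_def, UInt32.le_iff_toNat_le] at h; exact h
  have h128 : c.toNat < 128 := by omega
  have hmain := pv_aux_map c.toNat h128 hn
  rwa [Char.ofNat_toNat] at hmain

theorem pv_int_eq_digit36 (c : Char) (h : '0' ≤ c ∧ c ≤ '9') :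
    (PySem.Int.ofStr? (String.ofList [c])).getD 0 = pvDigit36 c := by
  have hn : 48 ≤ c.toNat ∧ c.toNat ≤ 57 := by
    simp only [Char.le_def, UInt32.le_iff_toNat_le] at h; exact h
  have h128 : c.toNat < 128 := by omega
  have hmain := pv_aux_int c.toNat h128 hn
  rwa [Char.ofNat_toNat] at hmain

-- a member of enumerate(l.reverse) has its element in l
theorem pv_mem_of_enum_rev {l : List Char} {p : Int × Char}
    (hp : p ∈ PySem.List.enumerate l.reverse 0) : p.2 ∈ l := by
  obtain ⟨k, hk, rfl⟩ := (PySem.List.mem_enumerate_iff _ _ p).mp hp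
  exact List.mem_reverse.mp (List.getElem_mem hk)

-- ===== VERDICT (by name: the statement is the Claim_ definition above) =====
theorem convert_num_from_some_other_base_to_base_10_spec : Claim_equal_convert_num_from_some_other_base_to_base_10 := by
  intro num b1 _hdom hpre
  unfold Pre_convert_num_from_some_other_base_to_base_10 at hpre
  rw [List.all_eq_true] at hpre
  unfold Spec_convert_num_from_some_other_base_to_base_10
  unfold convert_num_from_some_other_base_to_base_10 convert_num_from_some_other_base_to_base_10_alt
  by_cases hb : b1 = 10
  · subst hb
    rw [if_pos rfl]
    unfold convert_list_to_num
    rw [pv_horner pvDigit36 10 num.toList 0]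
    simp only [zero_mul, zero_add]
    apply PySem.List.foldl_congr_mem
    intro acc p hp
    have hd := hpre p.2 (pv_mem_of_enum_rev hp)
    simp [pvValidChar] at hd
    rw [pv_int_eq_digit36 p.2 hd]
  · simp only [if_neg hb]
    rw [pv_horner pvDigit36 b1 num.toList 0]
    simp only [zero_mul, zero_add]
    apply PySem.List.foldl_congr_mem
    intro acc p hp
    have hd := hpre p.2 (pv_mem_of_enum_rev hp)
    simp [pvValidChar, hb] at hd
    rw [pv_map_eq_digit36 p.2 hd]
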